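-- pv_equiv track=rewrite | github.com/ticoAg/skills | fast-edit/scripts/edit.py | _bracket_balance
-- ===== SOURCE A (Python) =====
-- _BRACKETS = {"(": ")", "[": "]", "{": "}"}
--
-- _OPEN = set(_BRACKETS.keys())
--
-- _CLOSE = set(_BRACKETS.values())
--
-- def _bracket_balance(text):
--     """Count net bracket balance: positive = more opens, negative = more closes."""
--     counts = {}
--     in_string = None
--     escape = False
--     for ch in text:
--         if escape:
--             escape = False
--             continue
--         if ch == "\\":
--             escape = True
--             continue
--         if ch in ("\"", "'"):
--             if in_string == ch:
--                 in_string = None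
--             elif in_string is None:
--                 in_string = ch
--             continue
--         if in_string:
--             continue
--         if ch in _OPEN or ch in _CLOSE:
--             counts[ch] = counts.get(ch, 0) + 1
--     # Net balance per bracket type
--     balance = {}
--     for o, c in _BRACKETS.items():
--         balance[o + c] = counts.get(o, 0) - counts.get(c, 0)
--     return balance
-- ===== SOURCE B (Python) =====
-- _BRACKETS = {"(": ")", "[": "]", "{": "}"}
--
--
-- def _unescape(text):
--     """Drop every backslash together with the character it escapes."""
--     out = []
--     it = iter(text)
--     for ch in it:
--         if ch == "\\":
--             next(it, None)  # consume the escaped character (if any)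
--         else:
--             out.append(ch)
--     return out
--
--
-- def _outside_strings(chars):
--     """Keep the characters outside string literals (input has no escapes)."""
--     out = []
--     it = iter(chars)
--     for ch in it:
--         if ch in ("\"", "'"):
--             for ch2 in it:  # consume the whole string literal
--                 if ch2 == ch:
--                     break
--         else:
--             out.append(ch)
--     return out
--
--
-- def _bracket_balance(text):
--     """Three staged passes: strip escapes, drop string literals, then count."""
--     outside = _outside_strings(_unescape(text))
--     return {o + c: outside.count(o) - outside.count(c) for o, c in _BRACKETS.items()}
-- ===== Notes on version B (the rewrite author's own statement) =====
-- stated objective: alternative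
-- what changed: B replaces A's single fused state-machine scan (escape flag + in_string variable + counts dict) by three staged passes with no state flags: an escape-stripping pass that consumes backslash pairs from an iterator, a string-removal pass whose nested loop consumes each string literal from the shared iterator, and a final counting phase with list.count.
import Mathlib
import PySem

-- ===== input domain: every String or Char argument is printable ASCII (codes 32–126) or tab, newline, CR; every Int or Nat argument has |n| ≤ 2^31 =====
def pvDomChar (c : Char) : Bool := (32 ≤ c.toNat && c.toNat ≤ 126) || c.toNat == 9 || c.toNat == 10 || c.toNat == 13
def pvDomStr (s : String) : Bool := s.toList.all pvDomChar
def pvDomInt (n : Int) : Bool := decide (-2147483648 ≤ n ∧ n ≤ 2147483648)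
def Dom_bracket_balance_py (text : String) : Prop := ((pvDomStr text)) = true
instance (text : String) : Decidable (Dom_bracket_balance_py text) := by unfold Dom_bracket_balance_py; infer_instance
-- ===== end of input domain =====

-- B replaces A's fused state-machine scan by three staged passes (strip escapes,
-- drop string literals, count brackets with list.count); objective: alternative, same cost.

-- ===== PORT A =====
-- one iteration of A's for-loop: state = (counts dict, in_string, escape)
def bbA_step (st : PySem.Dict Char Int × Option Char × Bool) (ch : Char) :
    PySem.Dict Char Int × Option Char × Bool :=
  let counts := st.1
  let in_string := st.2.1
  let escape := st.2.2
  if escape then (counts, in_string, false)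
  else if ch = '\\' then (counts, in_string, true)
  else if ch = '"' ∨ ch = '\'' then
    (if in_string = some ch then (counts, (none : Option Char), escape)
     else if in_string = none then (counts, some ch, escape)
     else (counts, in_string, escape))
  else if in_string.isSome then (counts, in_string, escape)
  else if ch ∈ ['(', '[', '{'] ∨ ch ∈ [')', ']', '}'] then
    (counts.insert ch (counts.getD ch 0 + 1), in_string, escape)
  else (counts, in_string, escape)

def bracket_balance_py (text : String) : List (String × Int) :=
  let st := text.toList.foldl bbA_step (PySem.Dict.empty, (none : Option Char), false)
  let counts := st.1
  -- the 'for o, c in _BRACKETS.items()' loop over the fixed 3-pair dict, unrolled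
  [("()", counts.getD '(' 0 - counts.getD ')' 0),
   ("[]", counts.getD '[' 0 - counts.getD ']' 0),
   ("{}", counts.getD '{' 0 - counts.getD '}' 0)]

-- ===== PORT B =====
-- Source B's _unescape: the 'for ch in it' loop with 'next(it, None)' consuming the escaped char
def bbUnescape : List Char → List Char
  | [] => []
  | ch :: t =>
    if ch = '\\' then
      match t with
      | [] => []              -- next(it, None) on an exhausted iterator
      | _ :: t' => bbUnescape t'
    else ch :: bbUnescape t

-- Source B's _outside_strings: outer loop / inner string-consuming loop on the shared iterator
mutual
def bbOutside : List Char → List Char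
  | [] => []
  | ch :: t =>
    if ch = '"' ∨ ch = '\'' then bbConsume ch t
    else ch :: bbOutside t
def bbConsume (q : Char) : List Char → List Char
  | [] => []
  | ch :: t => if ch = q then bbOutside t else bbConsume q t
end

def bracket_balance_py_alt (text : String) : List (String × Int) :=
  let outside := bbOutside (bbUnescape text.toList)
  [("()", (outside.count '(' : Int) - (outside.count ')' : Int)),
   ("[]", (outside.count '[' : Int) - (outside.count ']' : Int)),
   ("{}", (outside.count '{' : Int) - (outside.count '}' : Int))]

-- ===== PRECONDITION & SPEC =====
def Spec_bracket_balance_py (text : String) (out : List (String × Int)) : Prop := out = bracket_balance_py_alt text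
instance (text : String) (out : List (String × Int)) : Decidable (Spec_bracket_balance_py text out) := by unfold Spec_bracket_balance_py; infer_instance

-- ===== CLAIM (what is proved, stated in full; the proofs are below) =====
def Claim_equal_bracket_balance_py : Prop := ∀ (text : String), Dom_bracket_balance_py text → Spec_bracket_balance_py text (bracket_balance_py text)

-- ===== LEMMAS AND PROOFS =====

-- unfolding equations for B's pattern-consuming recursions
lemma bbUnescape_nil : bbUnescape [] = [] := by rw [bbUnescape.eq_def]
lemma bbUnescape_esc_nil : bbUnescape ['\\'] = [] := by rw [bbUnescape.eq_def]; simp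
lemma bbUnescape_esc (c : Char) (t : List Char) :
    bbUnescape ('\\' :: c :: t) = bbUnescape t := by rw [bbUnescape.eq_def]; simp
lemma bbUnescape_cons (ch : Char) (t : List Char) (h : ch ≠ '\\') :
    bbUnescape (ch :: t) = ch :: bbUnescape t := by rw [bbUnescape.eq_def]; simp [h]
lemma bbOutside_nil : bbOutside [] = [] := by rw [bbOutside.eq_def]
lemma bbOutside_quote (ch : Char) (t : List Char) (hq : ch = '"' ∨ ch = '\'') :
    bbOutside (ch :: t) = bbConsume ch t := by rw [bbOutside.eq_def]; simp [hq]
lemma bbOutside_cons (ch : Char) (t : List Char) (hq : ¬ (ch = '"' ∨ ch = '\'')) :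
    bbOutside (ch :: t) = ch :: bbOutside t := by rw [bbOutside.eq_def]; simp [hq]
lemma bbConsume_nil (q : Char) : bbConsume q [] = [] := by rw [bbConsume.eq_def]
lemma bbConsume_close (q : Char) (t : List Char) : bbConsume q (q :: t) = bbOutside t := by
  rw [bbConsume.eq_def]; simp
lemma bbConsume_cons (q ch : Char) (t : List Char) (h : ch ≠ q) :
    bbConsume q (ch :: t) = bbConsume q t := by rw [bbConsume.eq_def]; simp [h]

-- bbUnescape never leaves a backslash in its output
lemma bbUnescape_no_backslash (l : List Char) : '\\' ∉ bbUnescape l := by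
  induction l using bbUnescape.induct with
  | case1 => simp [bbUnescape_nil]
  | case2 => simp [bbUnescape_esc_nil]
  | case3 c t ih => simpa [bbUnescape_esc] using ih
  | case4 c t h ih => simp [bbUnescape_cons c t h]; exact ⟨Ne.symm h, ih⟩

-- facts about one step of A's loop (used by the staged decomposition below)
lemma stepA_nonesc (d : PySem.Dict Char Int) (s : Option Char) (ch : Char)
    (h : ch ≠ '\\') : ∃ d' s', bbA_step (d, s, false) ch = (d', s', false) := by
  simp only [bbA_step, if_neg h]
  split_ifs <;> exact ⟨_, _, rfl⟩

-- A's fold over the raw text equals A's fold over the escape-stripped text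
-- (counts and in_string components; the final escape flag may differ)
lemma foldA_unescape (l : List Char) (d : PySem.Dict Char Int) (s : Option Char) :
    (l.foldl bbA_step (d, s, false)).1 = ((bbUnescape l).foldl bbA_step (d, s, false)).1 ∧
    (l.foldl bbA_step (d, s, false)).2.1 = ((bbUnescape l).foldl bbA_step (d, s, false)).2.1 := by
  induction l using bbUnescape.induct generalizing d s with
  | case1 => exact ⟨rfl, rfl⟩
  | case2 => simp [bbUnescape_esc_nil, bbA_step]
  | case3 c t ih =>
    rw [bbUnescape_esc]
    simp only [List.foldl_cons]
    have h1 : bbA_step (d, s, false) '\\' = (d, s, true) := by simp [bbA_step]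
    have h2 : bbA_step (d, s, true) c = (d, s, false) := by simp [bbA_step]
    rw [h1, h2]; exact ih d s
  | case4 ch t h ih =>
    rw [bbUnescape_cons ch t h]
    simp only [List.foldl_cons]
    obtain ⟨d', s', hds⟩ := stepA_nonesc d s ch h
    rw [hds]; exact ih d' s'

-- the staged state selector: B's remaining passes seen from A's in_string component
def bbF : Option Char → List Char → List Char
  | none, l => bbOutside l
  | some q, l => bbConsume q l

lemma quote_step_open (d : PySem.Dict Char Int) (ch : Char)
    (hq : ch = '"' ∨ ch = '\'') : bbA_step (d, none, false) ch = (d, some ch, false) := by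
  rcases hq with h | h <;> subst h <;> simp [bbA_step]

lemma quote_step_close (d : PySem.Dict Char Int) (ch : Char)
    (hq : ch = '"' ∨ ch = '\'') : bbA_step (d, some ch, false) ch = (d, none, false) := by
  rcases hq with h | h <;> subst h <;> simp [bbA_step]

lemma quote_step_other (d : PySem.Dict Char Int) (q ch : Char)
    (hq : ch = '"' ∨ ch = '\'') (hne : q ≠ ch) :
    bbA_step (d, some q, false) ch = (d, some q, false) := by
  have h1 : ¬ ((some q : Option Char) = some ch) := by simpa using hne
  rcases hq with h | h <;> subst h <;> simp [bbA_step, h1]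

lemma instring_step (d : PySem.Dict Char Int) (q ch : Char)
    (hb : ch ≠ '\\') (hq : ¬ (ch = '"' ∨ ch = '\'')) :
    bbA_step (d, some q, false) ch = (d, some q, false) := by
  simp [bbA_step, hb, hq]

lemma bracket_step (d : PySem.Dict Char Int) (ch : Char)
    (hb : ch ≠ '\\') (hq : ¬ (ch = '"' ∨ ch = '\''))
    (hbr : ch ∈ ['(', '[', '{'] ∨ ch ∈ [')', ']', '}']) :
    bbA_step (d, none, false) ch = (d.insert ch (d.getD ch 0 + 1), none, false) := by
  simp only [bbA_step, if_neg hb, if_neg hq, Option.isSome_none, Bool.false_eq_true,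
    if_neg (by simp : ¬False), if_pos hbr]

lemma plain_step (d : PySem.Dict Char Int) (ch : Char)
    (hb : ch ≠ '\\') (hq : ¬ (ch = '"' ∨ ch = '\''))
    (hbr : ¬ (ch ∈ ['(', '[', '{'] ∨ ch ∈ [')', ']', '}'])) :
    bbA_step (d, none, false) ch = (d, none, false) := by
  have hbr' : ¬ ((ch = '(' ∨ ch = '[' ∨ ch = '{') ∨ (ch = ')' ∨ ch = ']' ∨ ch = '}')) := by
    simpa using hbr
  simp [bbA_step, hb, hq, hbr']

-- main invariant: on backslash-free input, A's count of each bracket char equals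
-- the starting count plus its number of occurrences in B's outside-string residue
lemma foldA_counts (l : List Char) (d : PySem.Dict Char Int) (s : Option Char)
    (hs : ∀ q, s = some q → (q = '"' ∨ q = '\''))
    (hl : '\\' ∉ l) (c : Char) (hc : c ∈ ['(', ')', '[', ']', '{', '}']) :
    ((l.foldl bbA_step (d, s, false)).1).getD c 0 = d.getD c 0 + ((bbF s l).count c : Int) := by
  induction l generalizing d s with
  | nil => cases s <;> simp [bbF, bbOutside_nil, bbConsume_nil]
  | cons ch t ih =>
    have hnb : ch ≠ '\\' := fun h => hl (h ▸ List.mem_cons_self ..)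
    have hlt : '\\' ∉ t := fun h => hl (List.mem_cons_of_mem _ h)
    simp only [List.foldl_cons]
    by_cases hq : ch = '"' ∨ ch = '\''
    · -- ch is a quote character; a quote is never a bracket
      cases s with
      | none =>
        rw [quote_step_open d ch hq,
          ih d (some ch) (by intro q hq'; exact (Option.some.inj hq') ▸ hq) hlt]
        have : bbF none (ch :: t) = bbF (some ch) t := by
          simp only [bbF]; rw [bbOutside_quote ch t hq]
        rw [this]
      | some q =>
        by_cases hqq : q = ch
        · subst hqq
          rw [quote_step_close d q hq, ih d none (by simp) hlt]
          have : bbF (some q) (q :: t) = bbF none t := by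
            simp only [bbF]; rw [bbConsume_close]
          rw [this]
        · rw [quote_step_other d q ch hq hqq, ih d (some q) hs hlt]
          have : bbF (some q) (ch :: t) = bbF (some q) t := by
            simp only [bbF]; rw [bbConsume_cons q ch t (fun h => hqq h.symm)]
          rw [this]
    · cases s with
      | some q =>
        have hchq : ch ≠ q := fun h => hq (h ▸ hs q rfl)
        rw [instring_step d q ch hnb hq, ih d (some q) hs hlt]
        have : bbF (some q) (ch :: t) = bbF (some q) t := by
          simp only [bbF]; rw [bbConsume_cons q ch t hchq]
        rw [this]
      | none =>
        have hcons : bbF none (ch :: t) = ch :: bbF none t := by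
          simp only [bbF]; rw [bbOutside_cons ch t hq]
        by_cases hb : ch ∈ ['(', '[', '{'] ∨ ch ∈ [')', ']', '}']
        · rw [bracket_step d ch hnb hq hb, ih _ none (by simp) hlt, hcons,
            PySem.Dict.getD_insert, List.count_cons]
          by_cases hcch : c = ch
          · subst hcch; simp; ring
          · have h2 : (ch == c) = false := by
              simp only [beq_eq_false_iff_ne, ne_eq]
              exact fun h => hcch h.symm
            simp [hcch, h2]
        · rw [plain_step d ch hnb hq hb, ih d none (by simp) hlt, hcons, List.count_cons]
          have hcch : (ch == c) = false := by
            simp only [beq_eq_false_iff_ne, ne_eq]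
            intro h; subst h
            refine hb ?_
            rcases (by simpa using hc : ch = '(' ∨ ch = ')' ∨ ch = '[' ∨ ch = ']' ∨ ch = '{' ∨ ch = '}') with
              h | h | h | h | h | h <;> subst h <;> decide
          simp [hcch]

-- ===== VERDICT (by name: the statement is the Claim_ definition above) =====
theorem bracket_balance_py_spec : Claim_equal_bracket_balance_py := by
  intro text _
  unfold Spec_bracket_balance_py bracket_balance_py bracket_balance_py_alt
  have key : ∀ c ∈ ['(', ')', '[', ']', '{', '}'],
      ((text.toList.foldl bbA_step (PySem.Dict.empty, (none : Option Char), false)).1).getD c 0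
        = ((bbOutside (bbUnescape text.toList)).count c : Int) := by
    intro c hc
    rw [(foldA_unescape text.toList PySem.Dict.empty none).1,
        foldA_counts (bbUnescape text.toList) PySem.Dict.empty none (by simp)
          (bbUnescape_no_backslash _) c hc]
    simp [bbF, PySem.Dict.getD_empty]
  simp only [key '(' (by simp), key ')' (by simp), key '[' (by simp),
    key ']' (by simp), key '{' (by simp), key '}' (by simp)]
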